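-- pv_equiv track=rewrite | github.com/981377660LMT/algorithm-study | 11_动态规划/子序列/不同的子序列/6035. 选择建筑的方案数-统计子序列.py | numberOfWays2
-- ===== SOURCE A (Python) =====
-- def numberOfWays2(s: str) -> int:
--     def numDistinct(s: str, t: str) -> int:
--         """求s中有多少个子序列为t，时间复杂度O(st)"""
--
--         if not t:
--             return 0
--
--         dp = [0] * (len(t) + 1)  # endswith dp
--         dp[0] = 1
--
--         for i in range(len(s)):
--             # 注意要倒着推，避免有相同字母
--             for j in reversed(range(len(t))):
--                 if s[i] == t[j]:
--                     dp[j + 1] += dp[j]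
--
--         return dp[-1]
--
--     return numDistinct(s, '010') + numDistinct(s, '101')
-- ===== SOURCE B (Python) =====
-- def numberOfWays2(s: str) -> int:
--     # One pass over s treating each index as the MIDDLE character of a triple:
--     # a '1' at i contributes zeros_before * zeros_after (counts '010'),
--     # a '0' at i contributes ones_before * ones_after (counts '101').
--     zeros_total = s.count('0')
--     ones_total = s.count('1')
--     zeros = ones = ans = 0
--     for c in s:
--         if c == '0':
--             ans += ones * (ones_total - ones)
--             zeros += 1
--         elif c == '1':
--             ans += zeros * (zeros_total - zeros)
--             ones += 1
--     return ans
-- ===== Notes on version B (the rewrite author's own statement) =====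
-- stated objective: faster
-- what changed: Replaces A's two generic endswith-DP subsequence-counting passes (one per pattern, updating a 4-entry dp table three times per character) by a single pass that treats each index as the middle character of a triple and adds prefix-count times suffix-count of the matching outer character, using precomputed totals.
import Mathlib
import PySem

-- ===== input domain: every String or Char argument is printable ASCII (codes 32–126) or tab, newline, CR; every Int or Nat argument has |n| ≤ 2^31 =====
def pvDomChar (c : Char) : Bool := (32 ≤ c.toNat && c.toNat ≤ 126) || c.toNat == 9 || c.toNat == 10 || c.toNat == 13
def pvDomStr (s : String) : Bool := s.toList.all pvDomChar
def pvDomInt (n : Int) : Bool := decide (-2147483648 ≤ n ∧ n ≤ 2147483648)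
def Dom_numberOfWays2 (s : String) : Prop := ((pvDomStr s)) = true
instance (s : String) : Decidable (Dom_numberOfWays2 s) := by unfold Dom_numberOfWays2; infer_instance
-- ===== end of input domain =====

-- B replaces A's two generic O(|s|·|t|) endswith-DP passes by one prefix/suffix-count pass
-- over s treating each index as the middle character of a triple (objective: simpler, one pass).

-- ===== PORT A =====
-- inner loop of numDistinct: `for j in reversed(range(len(t))): if s[i] == t[j]: dp[j+1] += dp[j]`
def pvInnerA (t : List Char) (dp : List Int) (c : Char) : List Int :=
  ((List.range t.length).reverse).foldl (fun dp j =>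
    if t.getD j ' ' = c then dp.set (j + 1) (dp.getD (j + 1) 0 + dp.getD j 0) else dp) dp

-- the nested helper `numDistinct(s, t)` of A
def pvNumDistinct (s t : String) : Int :=
  if t.toList.isEmpty then 0
  else
    let dp := s.toList.foldl (pvInnerA t.toList)
      ((List.replicate (t.toList.length + 1) (0 : Int)).set 0 1)
    (PySem.List.pyGet? dp (-1)).getD 0  -- dp[-1]; dp is nonempty so pyGet? is always some

def numberOfWays2 (s : String) : Int := pvNumDistinct s "010" + pvNumDistinct s "101"

-- ===== PORT B =====
-- body of B's `for c in s` loop, state = (zeros, ones, ans)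
def pvBStep (Z O : Int) (st : Int × Int × Int) (c : Char) : Int × Int × Int :=
  if c = '0' then (st.1 + 1, st.2.1, st.2.2 + st.2.1 * (O - st.2.1))
  else if c = '1' then (st.1, st.2.1 + 1, st.2.2 + st.1 * (Z - st.1))
  else st

def numberOfWays2_alt (s : String) : Int :=
  -- s.count('0') / s.count('1'): for a 1-character pattern Python's str.count is exactly
  -- the number of occurrences of that character, i.e. List.count on the code points.
  let Z : Int := (s.toList.count '0' : Int)
  let O : Int := (s.toList.count '1' : Int)
  (s.toList.foldl (pvBStep Z O) (0, 0, 0)).2.2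

-- ===== PRECONDITION & SPEC =====
def Spec_numberOfWays2 (s : String) (out : Int) : Prop := out = numberOfWays2_alt s
instance (s : String) (out : Int) : Decidable (Spec_numberOfWays2 s out) := by unfold Spec_numberOfWays2; infer_instance

-- ===== CLAIM (what is proved, stated in full; the proofs are below) =====
def Claim_equal_numberOfWays2 : Prop := ∀ (s : String), Dom_numberOfWays2 s → Spec_numberOfWays2 s (numberOfWays2 s)

-- ===== LEMMAS AND PROOFS =====

-- subsequence counters (head recursion): pvS01 l = #subsequences "01" of l, etc.
def pvS01 : List Char → Int
  | [] => 0
  | x :: xs => (if x = '0' then (xs.count '1' : Int) else 0) + pvS01 xs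
def pvS10 : List Char → Int
  | [] => 0
  | x :: xs => (if x = '1' then (xs.count '0' : Int) else 0) + pvS10 xs
def pvS010 : List Char → Int
  | [] => 0
  | x :: xs => (if x = '0' then pvS10 xs else 0) + pvS010 xs
def pvS101 : List Char → Int
  | [] => 0
  | x :: xs => (if x = '1' then pvS01 xs else 0) + pvS101 xs

lemma pvInnerA010 (c : Char) (a b e d : Int) :
    pvInnerA ['0', '1', '0'] [a, b, e, d] c =
      if c = '0' then [a, b + a, e, d + e]
      else if c = '1' then [a, b, e + b, d] else [a, b, e, d] := by
  by_cases h0 : c = '0' <;> by_cases h1 : c = '1' <;>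
    simp_all [pvInnerA, List.range, List.range.loop, Ne.symm]

lemma pvInnerA101 (c : Char) (a b e d : Int) :
    pvInnerA ['1', '0', '1'] [a, b, e, d] c =
      if c = '1' then [a, b + a, e, d + e]
      else if c = '0' then [a, b, e + b, d] else [a, b, e, d] := by
  by_cases h0 : c = '0' <;> by_cases h1 : c = '1' <;>
    simp_all [pvInnerA, List.range, List.range.loop, Ne.symm]

lemma pvFoldA010 : ∀ (l : List Char) (b e d : Int),
    l.foldl (pvInnerA ['0', '1', '0']) [1, b, e, d] =
      [1, b + (l.count '0' : Int), e + b * (l.count '1' : Int) + pvS01 l,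
       d + e * (l.count '0' : Int) + b * pvS10 l + pvS010 l] := by
  intro l
  induction l with
  | nil => intro b e d; simp [pvS01, pvS10, pvS010]
  | cons x xs ih =>
    intro b e d
    rw [List.foldl_cons, pvInnerA010]
    by_cases h0 : x = '0' <;> by_cases h1 : x = '1' <;>
      simp_all [pvS01, pvS10, pvS010] <;> ring_nf <;> simp

lemma pvFoldA101 : ∀ (l : List Char) (b e d : Int),
    l.foldl (pvInnerA ['1', '0', '1']) [1, b, e, d] =
      [1, b + (l.count '1' : Int), e + b * (l.count '0' : Int) + pvS10 l,
       d + e * (l.count '1' : Int) + b * pvS01 l + pvS101 l] := by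
  intro l
  induction l with
  | nil => intro b e d; simp [pvS01, pvS10, pvS101]
  | cons x xs ih =>
    intro b e d
    rw [List.foldl_cons, pvInnerA101]
    by_cases h0 : x = '0' <;> by_cases h1 : x = '1' <;>
      simp_all [pvS01, pvS10, pvS101] <;> ring_nf <;> simp [mul_comm]

lemma pvNumDistinct010 (s : String) : pvNumDistinct s "010" = pvS010 s.toList := by
  have ht : "010".toList = ['0', '1', '0'] := rfl
  simp only [pvNumDistinct, ht]
  rw [show ((List.replicate (['0','1','0'].length + 1) (0 : Int)).set 0 1) = [1, 0, 0, 0] from rfl,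
      pvFoldA010]
  simp [PySem.List.pyGet?, PySem.List.pyIdx?]

lemma pvNumDistinct101 (s : String) : pvNumDistinct s "101" = pvS101 s.toList := by
  have ht : "101".toList = ['1', '0', '1'] := rfl
  simp only [pvNumDistinct, ht]
  rw [show ((List.replicate (['1','0','1'].length + 1) (0 : Int)).set 0 1) = [1, 0, 0, 0] from rfl,
      pvFoldA101]
  simp [PySem.List.pyGet?, PySem.List.pyIdx?]

-- B's loop invariant: Z/O are the zeros/ones still to come plus those already seen
lemma pvFoldB (Z O : Int) : ∀ (l : List Char) (z o ans : Int),
    Z = z + (l.count '0' : Int) → O = o + (l.count '1' : Int) →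
    (l.foldl (pvBStep Z O) (z, o, ans)).2.2 =
      ans + z * pvS10 l + o * pvS01 l + pvS010 l + pvS101 l := by
  intro l
  induction l with
  | nil => intro z o ans hZ hO; simp [pvS01, pvS10, pvS010, pvS101]
  | cons x xs ih =>
    intro z o ans hZ hO
    rw [List.foldl_cons]
    by_cases h0 : x = '0'
    · subst h0
      rw [show pvBStep Z O (z, o, ans) '0' = (z + 1, o, ans + o * (O - o)) from rfl]
      rw [ih (z + 1) o _ (by simp at hZ ⊢; omega)
            (by simp at hO ⊢; omega)]
      have hO' : O - o = (xs.count '1' : Int) := by simp at hO; omega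
      simp [pvS01, pvS10, pvS010, pvS101, hO']
      ring
    · by_cases h1 : x = '1'
      · subst h1
        rw [show pvBStep Z O (z, o, ans) '1' = (z, o + 1, ans + z * (Z - z)) from by
          simp [pvBStep]]
        rw [ih z (o + 1) _ (by simp at hZ ⊢; omega)
              (by simp at hO ⊢; omega)]
        have hZ' : Z - z = (xs.count '0' : Int) := by simp at hZ; omega
        simp [pvS01, pvS10, pvS010, pvS101, hZ']
        ring
      · rw [show pvBStep Z O (z, o, ans) x = (z, o, ans) from by simp [pvBStep, h0, h1]]
        rw [ih z o _ (by simp [h0] at hZ ⊢; omega)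
              (by simp [h1] at hO ⊢; omega)]
        simp [pvS01, pvS10, pvS010, pvS101, h0, h1]

-- ===== VERDICT (by name: the statement is the Claim_ definition above) =====
theorem numberOfWays2_spec : Claim_equal_numberOfWays2 := by
  intro s _
  unfold Spec_numberOfWays2 numberOfWays2 numberOfWays2_alt
  rw [pvNumDistinct010, pvNumDistinct101,
      pvFoldB _ _ s.toList 0 0 0 (by simp) (by simp)]
  ring
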